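-- pv_equiv track=rewrite | github.com/nabilkhan99/CaseForgeVercel | Backend/app/utils/capabilities.py | parse_capabilities
-- ===== SOURCE A (Python) =====
-- from typing import Dict, List
--
-- def parse_capabilities(content: str) -> Dict[str, List[str]]:
--     """Parse capabilities from configuration content."""
--     capabilities = {}
--     current_capability = None
--     current_points = []
--
--     lines = [line.rstrip() for line in content.split('\n') if line.strip()]
--
--     for line in lines:
--         if not line.startswith('-'):
--             if current_capability and current_points:
--                 capabilities[current_capability] = current_points
--             current_capability = line
--             current_points = []
--         else:
--             current_points.append(line.lstrip('- '))
--
--     if current_capability and current_points: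
--         capabilities[current_capability] = current_points
--
--     return capabilities
-- ===== SOURCE B (Python) =====
-- def parse_capabilities(content):
--     """Parse capabilities from configuration content."""
--     lines = [line.rstrip() for line in content.split('\n') if line.strip()]
--     # Phase 1: group consecutive lines into runs of headers / runs of bullets.
--     runs = []
--     i = 0
--     while i < len(lines):
--         flag = lines[i].startswith('-')
--         j = i + 1
--         while j < len(lines) and lines[j].startswith('-') == flag:
--             j += 1
--         runs.append((flag, lines[i:j]))
--         i = j
--     # Phase 2: pair each bullet-run with the last header of the preceding run.
--     capabilities = {}
--     for prev, nxt in zip(runs, runs[1:]):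
--         if nxt[0]:
--             capabilities[prev[1][-1]] = [l.lstrip('- ') for l in nxt[1]]
--     return capabilities
-- ===== Notes on version B (the rewrite author's own statement) =====
-- stated objective: alternative
-- what changed: Replaces A's single stateful pass (current capability + accumulating points with emit-on-header) by a two-phase decomposition: group the cleaned lines into alternating header-runs/bullet-runs, then pair each bullet-run with the last header of the preceding run via zip over adjacent runs.
import Mathlib
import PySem

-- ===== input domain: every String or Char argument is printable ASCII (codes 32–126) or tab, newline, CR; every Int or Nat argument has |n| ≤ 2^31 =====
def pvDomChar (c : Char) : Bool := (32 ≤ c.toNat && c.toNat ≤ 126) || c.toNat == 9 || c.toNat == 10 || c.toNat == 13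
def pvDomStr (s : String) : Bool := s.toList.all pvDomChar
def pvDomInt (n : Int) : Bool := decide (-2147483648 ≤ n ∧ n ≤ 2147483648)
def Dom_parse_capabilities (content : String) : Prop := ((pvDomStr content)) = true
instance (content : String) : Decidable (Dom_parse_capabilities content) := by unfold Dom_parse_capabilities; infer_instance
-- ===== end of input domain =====

-- B replaces A's single stateful pass by a two-phase decomposition (group lines into
-- header-runs/bullet-runs, then pair adjacent runs); same cost, alternative structure.

-- ===== PORT A =====
-- line.lstrip('- '): drop leading '-' and ' ' characters (hand-ported, exact on all inputs)
def pvClean (s : String) : String :=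
  String.ofList (s.toList.dropWhile (fun c => c == '-' || c == ' '))

-- [line.rstrip() for line in content.split('\n') if line.strip()]
-- (split? is always `some` here since the separator "\n" is nonempty)
def pvLines (content : String) : List String :=
  (((PySem.Str.split? content "\n").getD []).filter
      (fun l => PySem.Str.strip l != "")).map PySem.Str.rstrip

-- 'if current_capability and current_points: capabilities[current_capability] = current_points'
def pvEmit (caps : PySem.Dict String (List String)) (cur : Option String)
    (pts : List String) : PySem.Dict String (List String) :=
  match cur with
  | some c => if c ≠ "" ∧ pts ≠ [] then caps.insert c pts else caps
  | none => caps

-- body of A's for-loop; state = (capabilities, current_capability, current_points)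
def pvStepA (st : PySem.Dict String (List String) × Option String × List String)
    (line : String) : PySem.Dict String (List String) × Option String × List String :=
  if !(PySem.Str.startswith line "-") then
    (pvEmit st.1 st.2.1 st.2.2, some line, [])
  else
    (st.1, st.2.1, st.2.2 ++ [pvClean line])

def parse_capabilities (content : String) : List (String × List String) :=
  let st := (pvLines content).foldl pvStepA (PySem.Dict.empty, none, [])
  (pvEmit st.1 st.2.1 st.2.2).items

-- ===== PORT B =====
-- phase 1 of Source B: the outer while-loop; the inner while-scan is the takeWhile/dropWhile split
def pvRuns : List String → List (Bool × List String)
  | [] => []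
  | l :: ls =>
    (PySem.Str.startswith l "-",
      l :: ls.takeWhile (fun x => PySem.Str.startswith x "-" == PySem.Str.startswith l "-")) ::
      pvRuns (ls.dropWhile (fun x => PySem.Str.startswith x "-" == PySem.Str.startswith l "-"))
  termination_by lines => lines.length
  decreasing_by
    simp only [List.length_cons]
    have := List.length_dropWhile_le
      (fun x => PySem.Str.startswith x "-" == PySem.Str.startswith l "-") ls
    omega

-- body of Source B's pairing loop; prev[1][-1] is pyGet? (-1) (never none: runs are nonempty)
def pvStepB (caps : PySem.Dict String (List String))
    (pr : (Bool × List String) × (Bool × List String)) : PySem.Dict String (List String) :=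
  if pr.2.1 then
    caps.insert ((PySem.List.pyGet? pr.1.2 (-1)).getD "") (pr.2.2.map pvClean)
  else caps

def parse_capabilities_alt (content : String) : List (String × List String) :=
  let runs := pvRuns (pvLines content)
  ((runs.zip runs.tail).foldl pvStepB PySem.Dict.empty).items

-- ===== PRECONDITION & SPEC =====
def Spec_parse_capabilities (content : String) (out : List (String × List String)) : Prop := out = parse_capabilities_alt content
instance (content : String) (out : List (String × List String)) : Decidable (Spec_parse_capabilities content out) := by unfold Spec_parse_capabilities; infer_instance

-- ===== CLAIM (what is proved, stated in full; the proofs are below) =====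
def Claim_equal_parse_capabilities : Prop := ∀ (content : String), Dom_parse_capabilities content → Spec_parse_capabilities content (parse_capabilities content)

-- ===== LEMMAS AND PROOFS =====

-- B's pairing loop, named for the proofs
def pvPairB (caps : PySem.Dict String (List String))
    (runs : List (Bool × List String)) : PySem.Dict String (List String) :=
  (runs.zip runs.tail).foldl pvStepB caps

-- intermediate form: A's loop read run by run
def pvPairAux : PySem.Dict String (List String) → Option String → List String →
    List (Bool × List String) → PySem.Dict String (List String)
  | caps, cur, pts, [] => pvEmit caps cur pts
  | caps, cur, pts, (true, rs) :: rest => pvPairAux caps cur (pts ++ rs.map pvClean) rest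
  | caps, cur, pts, (false, rs) :: rest =>
      pvPairAux (pvEmit caps cur pts) (some (rs.getLastD "")) [] rest

def pvPhantom : Option String → List (Bool × List String)
  | none => []
  | some h => [(false, [h])]

-- consecutive runs carry different flags
def pvAlt : List (Bool × List String) → Prop
  | [] => True
  | [_] => True
  | a :: b :: t => a.1 ≠ b.1 ∧ pvAlt (b :: t)

def pvGoodRuns (runs : List (Bool × List String)) : Prop :=
  pvAlt runs ∧ ∀ r ∈ runs, r.2 ≠ [] ∧ ∀ x ∈ r.2, x ≠ ""

theorem pvAlt_tail (a : Bool × List String) (t : List (Bool × List String))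
    (h : pvAlt (a :: t)) : pvAlt t := by
  cases t with
  | nil => trivial
  | cons b t' => exact h.2

theorem pvEmit_nil (caps : PySem.Dict String (List String)) (cur : Option String) :
    pvEmit caps cur [] = caps := by cases cur <;> simp [pvEmit]

theorem pv_foldl_bullets (bs : List String)
    (h : ∀ b ∈ bs, PySem.Str.startswith b "-" = true) :
    ∀ st, bs.foldl pvStepA st = (st.1, st.2.1, st.2.2 ++ bs.map pvClean) := by
  induction bs with
  | nil => intro st; simp
  | cons b bs ih =>
    intro st
    have hb : PySem.Chars.startswith b.toList ['-'] = true := by simpa using h b (by simp)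
    simp only [List.foldl_cons, List.map_cons]
    rw [ih (fun x hx => h x (by simp [hx]))]
    simp [pvStepA, hb]

theorem pv_foldl_headers (hs : List String) (hne : hs ≠ [])
    (h : ∀ x ∈ hs, PySem.Str.startswith x "-" = false) :
    ∀ st, hs.foldl pvStepA st = (pvEmit st.1 st.2.1 st.2.2, some (hs.getLastD ""), []) := by
  induction hs with
  | nil => exact absurd rfl hne
  | cons a t ih =>
    intro st
    have ha : PySem.Chars.startswith a.toList ['-'] = false := by simpa using h a (by simp)
    cases t with
    | nil => simp [pvStepA, ha]
    | cons b t' =>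
      simp only [List.foldl_cons]
      have := ih (by simp) (fun x hx => h x (by simp [hx])) (pvStepA st a)
      simp only [List.foldl_cons] at this ⊢
      rw [this]
      simp [pvStepA, ha, pvEmit_nil]

theorem pv_pyGet_neg_one (l : List String) :
    (PySem.List.pyGet? l (-1)).getD "" = l.getLastD "" := by
  simp [PySem.List.pyGet?, PySem.List.pyIdx?]
  rcases l with _ | ⟨a, t⟩
  · simp
  · simp [List.getLast?_eq_getElem?]

theorem pvPairB_single (caps : PySem.Dict String (List String)) (r : Bool × List String) :
    pvPairB caps [r] = caps := by simp [pvPairB]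

theorem pvPairB_cons_cons (caps : PySem.Dict String (List String))
    (a b : Bool × List String) (t : List (Bool × List String)) :
    pvPairB caps (a :: b :: t) = pvPairB (pvStepB caps (a, b)) (b :: t) := by
  simp [pvPairB, List.zip_cons_cons]

theorem pvPairB_head_congr (caps : PySem.Dict String (List String))
    (f f' : Bool) (rs rs' : List String) (rest : List (Bool × List String))
    (h : rs.getLastD "" = rs'.getLastD "") :
    pvPairB caps ((f, rs) :: rest) = pvPairB caps ((f', rs') :: rest) := by
  cases rest with
  | nil => simp [pvPairB_single]
  | cons r t =>
    rw [pvPairB_cons_cons, pvPairB_cons_cons]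
    have h' : rs.getLast?.getD "" = rs'.getLast?.getD "" := by
      simpa [List.getLastD_eq_getLast?] using h
    have : pvStepB caps ((f, rs), r) = pvStepB caps ((f', rs'), r) := by
      simp [pvStepB, pv_pyGet_neg_one, List.getLastD_eq_getLast?, h']
    rw [this]

theorem pv_getLastD_mem (l : List String) (h : l ≠ []) : l.getLastD "" ∈ l := by
  rw [List.getLastD_eq_getLast?, List.getLast?_eq_some_getLast h]
  exact List.getLast_mem h

-- A's loop over the lines, read as pvPairAux over the runs
theorem pv_A_runs (n : Nat) : ∀ (lines : List String), lines.length ≤ n →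
    ∀ caps cur pts,
      pvEmit (lines.foldl pvStepA (caps, cur, pts)).1
          (lines.foldl pvStepA (caps, cur, pts)).2.1
          (lines.foldl pvStepA (caps, cur, pts)).2.2
        = pvPairAux caps cur pts (pvRuns lines) := by
  induction n with
  | zero =>
    intro lines hlen caps cur pts
    have : lines = [] := List.length_eq_zero_iff.mp (Nat.le_zero.mp hlen)
    subst this; simp [pvRuns, pvPairAux]
  | succ n ih =>
    intro lines hlen caps cur pts
    cases hl : lines with
    | nil => simp [pvRuns, pvPairAux]
    | cons l ls =>
      subst hl
      rw [pvRuns]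
      cases hflag : PySem.Str.startswith l "-" with
      | true =>
        have hdwlen :
            (ls.dropWhile (fun x => PySem.Str.startswith x "-" == true)).length ≤ n := by
          have := List.length_dropWhile_le (fun x => PySem.Str.startswith x "-" == true) ls
          simp at hlen; omega
        have hall : ∀ b ∈ l :: ls.takeWhile (fun x => PySem.Str.startswith x "-" == true),
            PySem.Str.startswith b "-" = true := by
          intro b hb
          rcases List.mem_cons.mp hb with h1 | h1
          · subst h1; exact hflag
          · simpa using List.mem_takeWhile_imp h1
        have hsp : l :: ls
            = (l :: ls.takeWhile (fun x => PySem.Str.startswith x "-" == true))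
              ++ ls.dropWhile (fun x => PySem.Str.startswith x "-" == true) := by
          rw [List.cons_append, List.takeWhile_append_dropWhile]
        conv_lhs => rw [hsp]
        rw [List.foldl_append, pv_foldl_bullets _ hall]
        simp only [pvPairAux]
        exact ih _ hdwlen caps cur _
      | false =>
        have hdwlen :
            (ls.dropWhile (fun x => PySem.Str.startswith x "-" == false)).length ≤ n := by
          have := List.length_dropWhile_le (fun x => PySem.Str.startswith x "-" == false) ls
          simp at hlen; omega
        have hall : ∀ b ∈ l :: ls.takeWhile (fun x => PySem.Str.startswith x "-" == false),
            PySem.Str.startswith b "-" = false := by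
          intro b hb
          rcases List.mem_cons.mp hb with h1 | h1
          · subst h1; exact hflag
          · simpa using List.mem_takeWhile_imp h1
        have hsp : l :: ls
            = (l :: ls.takeWhile (fun x => PySem.Str.startswith x "-" == false))
              ++ ls.dropWhile (fun x => PySem.Str.startswith x "-" == false) := by
          rw [List.cons_append, List.takeWhile_append_dropWhile]
        conv_lhs => rw [hsp]
        rw [List.foldl_append, pv_foldl_headers _ (by simp) hall]
        simp only [pvPairAux]
        exact ih _ hdwlen _ _ _

-- pvRuns produces alternating, nonempty runs of nonempty lines
theorem pv_runs_good (n : Nat) : ∀ lines : List String, lines.length ≤ n →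
    (∀ x ∈ lines, x ≠ "") → pvGoodRuns (pvRuns lines) := by
  induction n with
  | zero =>
    intro lines hlen _
    have : lines = [] := List.length_eq_zero_iff.mp (Nat.le_zero.mp hlen)
    subst this; exact ⟨by simp [pvRuns, pvAlt], by simp [pvRuns]⟩
  | succ n ih =>
    intro lines hlen hne
    cases hl : lines with
    | nil => exact ⟨by simp [pvRuns, pvAlt], by simp [pvRuns]⟩
    | cons l ls =>
      subst hl
      have hdwlen : (ls.dropWhile
          (fun x => PySem.Str.startswith x "-" == PySem.Str.startswith l "-")).length ≤ n := by
        have := List.length_dropWhile_le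
          (fun x => PySem.Str.startswith x "-" == PySem.Str.startswith l "-") ls
        simp at hlen; omega
      have hdwne : ∀ x ∈ ls.dropWhile
          (fun x => PySem.Str.startswith x "-" == PySem.Str.startswith l "-"), x ≠ "" := by
        intro x hx
        refine hne x ?_
        simp only [List.mem_cons]
        exact Or.inr ((List.dropWhile_sublist _).subset hx)
      obtain ⟨ihA, ihR⟩ := ih _ hdwlen hdwne
      rw [pvRuns]
      constructor
      · cases hdw : ls.dropWhile
            (fun x => PySem.Str.startswith x "-" == PySem.Str.startswith l "-") with
        | nil => simp [pvRuns, pvAlt]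
        | cons d dt =>
          rw [hdw] at ihA
          rw [pvRuns] at ihA ⊢
          simp only [pvAlt]
          refine ⟨?_, ihA⟩
          have w : ls.dropWhile
              (fun x => PySem.Str.startswith x "-" == PySem.Str.startswith l "-") ≠ [] := by
            rw [hdw]; simp
          have hd := List.head_dropWhile_not
            (fun x => PySem.Str.startswith x "-" == PySem.Str.startswith l "-") w
          simp only [hdw, List.head_cons] at hd
          simp only [beq_eq_false_iff_ne, ne_eq] at hd
          simpa using fun h => hd h.symm
      · intro r hr
        rcases List.mem_cons.mp hr with h1 | h1
        · subst h1
          refine ⟨by simp, ?_⟩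
          intro x hx
          rcases List.mem_cons.mp hx with h2 | h2
          · subst h2; exact hne _ (by simp)
          · refine hne x ?_
            simp only [List.mem_cons]
            exact Or.inr ((List.takeWhile_sublist _).subset h2)
        · exact (ihR r h1)

-- main bridge: pvPairAux from a clean state equals B's zip-fold (with a phantom header for cur)
theorem pv_M (n : Nat) : ∀ runs : List (Bool × List String), runs.length ≤ n →
    pvGoodRuns runs → ∀ caps cur, (∀ c, cur = some c → c ≠ "") →
      pvPairAux caps cur [] runs = pvPairB caps (pvPhantom cur ++ runs) := by
  induction n with
  | zero =>
    intro runs hlen _ caps cur hcur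
    have : runs = [] := List.length_eq_zero_iff.mp (Nat.le_zero.mp hlen)
    subst this
    cases cur with
    | none => simp [pvPairAux, pvPhantom, pvPairB, pvEmit]
    | some h => simp [pvPairAux, pvPhantom, pvPairB_single, pvEmit]
  | succ n ih =>
    intro runs hlen hgood caps cur hcur
    obtain ⟨hchain, hruns⟩ := hgood
    cases runs with
    | nil =>
      cases cur with
      | none => simp [pvPairAux, pvPhantom, pvPairB, pvEmit]
      | some h => simp [pvPairAux, pvPhantom, pvPairB_single, pvEmit]
    | cons r rest =>
      obtain ⟨f, rs⟩ := r
      have hrs : rs ≠ [] := (hruns (f, rs) (by simp)).1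
      have hrsne : ∀ x ∈ rs, x ≠ "" := (hruns (f, rs) (by simp)).2
      have hlast : rs.getLastD "" ≠ "" := hrsne _ (pv_getLastD_mem rs hrs)
      cases f with
      | false =>
        -- header run: becomes the new current capability (its last line)
        have step : pvPairAux caps cur [] ((false, rs) :: rest)
            = pvPairAux caps (some (rs.getLastD "")) [] rest := by
          simp [pvPairAux, pvEmit_nil]
        rw [step]
        have hrest : pvGoodRuns rest :=
          ⟨pvAlt_tail _ _ hchain, fun r hr => hruns r (by simp [hr])⟩
        rw [ih rest (by simp at hlen; omega) hrest caps (some (rs.getLastD ""))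
          (by intro c hc; cases hc; exact hlast)]
        cases cur with
        | none =>
          simp only [pvPhantom, List.singleton_append, List.nil_append]
          exact pvPairB_head_congr caps false false [rs.getLastD ""] rs rest (by simp)
        | some h =>
          simp only [pvPhantom, List.singleton_append]
          rw [pvPairB_cons_cons]
          have hstep : pvStepB caps ((false, [h]), (false, rs)) = caps := by simp [pvStepB]
          rw [hstep]
          exact pvPairB_head_congr caps false false [rs.getLastD ""] rs rest (by simp)
      | true =>
        -- bullet run
        have step : pvPairAux caps cur [] ((true, rs) :: rest)
            = pvPairAux caps cur (rs.map pvClean) rest := by simp [pvPairAux]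
        rw [step]
        have hmapne : rs.map pvClean ≠ [] := by simp [hrs]
        cases rest with
        | nil =>
          -- trailing bullet run
          cases cur with
          | none => simp [pvPairAux, pvEmit, pvPhantom, pvPairB_single]
          | some h =>
            have hh : h ≠ "" := hcur h rfl
            simp only [pvPairAux, pvPhantom, List.singleton_append]
            rw [pvPairB_cons_cons, pvPairB_single]
            simp [pvEmit, pvStepB, hh, hmapne, pv_pyGet_neg_one]
        | cons r2 rest' =>
          obtain ⟨f2, hs⟩ := r2
          have hf2 : f2 = false := by
            have := hchain.1
            simp only [ne_eq] at this
            cases f2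
            · rfl
            · exact absurd rfl this
          subst hf2
          have hhs : hs ≠ [] := (hruns (false, hs) (by simp)).1
          have hhsne : ∀ x ∈ hs, x ≠ "" := (hruns (false, hs) (by simp)).2
          have hhslast : hs.getLastD "" ≠ "" := hhsne _ (pv_getLastD_mem hs hhs)
          have step2 : pvPairAux caps cur (rs.map pvClean) ((false, hs) :: rest')
              = pvPairAux (pvEmit caps cur (rs.map pvClean)) (some (hs.getLastD "")) [] rest' := by
            simp [pvPairAux]
          rw [step2]
          have hrest' : pvGoodRuns rest' := by
            refine ⟨pvAlt_tail _ _ (pvAlt_tail _ _ hchain), fun r hr => hruns r (by simp [hr])⟩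
          rw [ih rest' (by simp at hlen; omega) hrest'
            (pvEmit caps cur (rs.map pvClean)) (some (hs.getLastD ""))
            (by intro c hc; cases hc; exact hhslast)]
          simp only [pvPhantom, List.singleton_append]
          rw [pvPairB_head_congr (pvEmit caps cur (rs.map pvClean))
            false false [hs.getLastD ""] hs rest' (by simp)]
          cases cur with
          | none =>
            simp only [List.nil_append]
            rw [pvPairB_cons_cons]
            have h0 : pvStepB caps ((true, rs), (false, hs)) = caps := by simp [pvStepB]
            rw [h0]
            simp [pvEmit]
          | some h =>
            have hh : h ≠ "" := hcur h rfl
            simp only [List.singleton_append]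
            rw [pvPairB_cons_cons]
            have h1 : pvStepB caps ((false, [h]), (true, rs))
                = caps.insert h (rs.map pvClean) := by
              simp [pvStepB, pv_pyGet_neg_one]
            rw [h1, pvPairB_cons_cons]
            have h2 : pvStepB (caps.insert h (rs.map pvClean)) ((true, rs), (false, hs))
                = caps.insert h (rs.map pvClean) := by simp [pvStepB]
            rw [h2]
            have h3 : pvEmit caps (some h) (rs.map pvClean) = caps.insert h (rs.map pvClean) := by
              simp [pvEmit, hh, hmapne]
            rw [h3]

-- every cleaned line is nonempty: strip l ≠ "" implies rstrip l ≠ ""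
theorem pv_rstrip_ne (l : String) (h : PySem.Str.strip l ≠ "") : PySem.Str.rstrip l ≠ "" := by
  intro hr
  apply h
  have h0 : PySem.Chars.rstrip l.toList = [] := by
    have := congrArg String.toList hr
    simpa [PySem.Str.rstrip] using this
  have hall : ∀ c ∈ l.toList.reverse, PySem.Chars.isspace c = true := by
    exact List.dropWhile_eq_nil_iff.mp (by
      simpa [PySem.Chars.rstrip, List.reverse_eq_nil_iff] using h0)
  have hls : PySem.Chars.lstrip l.toList = [] := by
    apply List.dropWhile_eq_nil_iff.mpr
    intro x hx; exact hall x (by simpa using hx)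
  simp [PySem.Str.strip, PySem.Chars.strip, hls, PySem.Chars.rstrip]

theorem pv_lines_ne (content : String) : ∀ x ∈ pvLines content, x ≠ "" := by
  intro x hx
  simp only [pvLines, List.mem_map, List.mem_filter] at hx
  obtain ⟨l, ⟨_, hl⟩, rfl⟩ := hx
  exact pv_rstrip_ne l (by simpa using hl)

-- ===== VERDICT (by name: the statement is the Claim_ definition above) =====
theorem parse_capabilities_spec : Claim_equal_parse_capabilities := by
  intro content _
  unfold Spec_parse_capabilities parse_capabilities parse_capabilities_alt
  simp only []
  rw [pv_A_runs (pvLines content).length (pvLines content) le_rfl PySem.Dict.empty none []]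
  have hgood := pv_runs_good (pvLines content).length (pvLines content) le_rfl
    (pv_lines_ne content)
  rw [pv_M (pvRuns (pvLines content)).length (pvRuns (pvLines content)) le_rfl
    hgood PySem.Dict.empty none (by intro c hc; cases hc)]
  rfl
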